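-- pv_equiv track=rewrite | github.com/hyeinisfree/kings-algorithm-study | seungmi/week1/예산.py | solution
-- ===== SOURCE A (Python) =====
-- def solution(d, budget):
--     d.sort()
--     d_number=0
--     for request in d:
--         if budget>=request:
--             budget-=request
--             d_number+=1
--
--     return d_number
-- ===== SOURCE B (Python) =====
-- def solution(d, budget):
--     # Prefix-sum table + scan instead of A's repeated budget subtraction.
--     # (Like A, this sorts d in place.)
--     d.sort()
--     prefix = []
--     total = 0
--     for x in d:
--         total += x
--         prefix.append(total)
--     count = 0
--     while count < len(prefix) and prefix[count] <= budget:
--         count += 1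
--     return count
-- ===== Notes on version B (the rewrite author's own statement) =====
-- stated objective: alternative
-- what changed: Replaces A's greedy pass that repeatedly subtracts each request from the remaining budget with building the prefix-sum table of the sorted requests once and counting how many leading prefix sums stay within the original budget.
import Mathlib
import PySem

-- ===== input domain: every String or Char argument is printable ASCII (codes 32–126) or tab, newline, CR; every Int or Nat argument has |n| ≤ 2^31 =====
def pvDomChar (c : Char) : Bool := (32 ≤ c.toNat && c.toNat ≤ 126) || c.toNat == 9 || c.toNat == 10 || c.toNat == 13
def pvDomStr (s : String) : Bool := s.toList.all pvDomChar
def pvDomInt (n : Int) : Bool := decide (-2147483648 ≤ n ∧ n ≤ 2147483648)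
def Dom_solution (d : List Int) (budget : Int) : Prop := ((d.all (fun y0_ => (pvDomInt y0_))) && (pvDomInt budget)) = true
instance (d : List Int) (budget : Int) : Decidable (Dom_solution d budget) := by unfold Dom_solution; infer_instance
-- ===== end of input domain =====

-- B replaces A's greedy budget-subtraction pass by a prefix-sum table plus a leading scan
-- (objective: alternative). Both A and B sort d in place in Python; the equivalence proved
-- here is about the return value.


-- ===== PORT A =====
def solution (d : List Int) (budget : Int) : Int :=
  let ds := PySem.List.sorted d (fun x => x) false
  (ds.foldl (fun (st : Int × Int) request =>
      if st.1 ≥ request then (st.1 - request, st.2 + 1) else st) (budget, 0)).2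

-- ===== PORT B =====
-- prefix-sum building loop of Source B (accumulator `total` = s)
def prefixSumsFrom (s : Int) : List Int → List Int
  | [] => []
  | x :: xs => (s + x) :: prefixSumsFrom (s + x) xs

-- the `while count < len(prefix) and prefix[count] <= budget` counting scan of Source B
def countWhileLe (budget : Int) : List Int → Int
  | [] => 0
  | p :: ps => if p ≤ budget then 1 + countWhileLe budget ps else 0

def solution_alt (d : List Int) (budget : Int) : Int :=
  let ds := PySem.List.sorted d (fun x => x) false
  countWhileLe budget (prefixSumsFrom 0 ds)

-- ===== PRECONDITION & SPEC =====
def Spec_solution (d : List Int) (budget : Int) (out : Int) : Prop := out = solution_alt d budget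
instance (d : List Int) (budget : Int) (out : Int) : Decidable (Spec_solution d budget out) := by unfold Spec_solution; infer_instance

-- ===== CLAIM (what is proved, stated in full; the proofs are below) =====
def Claim_equal_solution : Prop := ∀ (d : List Int) (budget : Int), Dom_solution d budget → Spec_solution d budget (solution d budget)

-- ===== LEMMAS AND PROOFS =====

-- A's loop leaves the state unchanged when every remaining request exceeds the budget
theorem aloop_skip_all (l : List Int) (b c : Int) (h : ∀ r ∈ l, b < r) :
    (l.foldl (fun (st : Int × Int) request =>
      if st.1 ≥ request then (st.1 - request, st.2 + 1) else st) (b, c)) = (b, c) := by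
  induction l with
  | nil => rfl
  | cons x xs ih =>
      have hx : b < x := h x (by simp)
      simp only [List.foldl_cons]
      rw [if_neg (by omega)]
      exact ih (fun r hr => h r (by simp [hr]))

-- main invariant: on a ≤-sorted list, A's greedy loop counts exactly the leading
-- prefix sums (taken from s) that stay within b, where the current budget is b - s
theorem aloop_eq_count (l : List Int) (hl : l.Pairwise (· ≤ ·)) :
    ∀ (s b c : Int),
      (l.foldl (fun (st : Int × Int) request =>
        if st.1 ≥ request then (st.1 - request, st.2 + 1) else st) (b - s, c)).2
      = c + countWhileLe b (prefixSumsFrom s l) := by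
  induction l with
  | nil => intro s b c; simp [prefixSumsFrom, countWhileLe]
  | cons x xs ih =>
      intro s b c
      rcases List.pairwise_cons.mp hl with ⟨hx, hxs⟩
      simp only [List.foldl_cons, prefixSumsFrom, countWhileLe]
      by_cases hle : s + x ≤ b
      · rw [if_pos (by omega), if_pos hle]
        have : b - s - x = b - (s + x) := by ring
        rw [this]
        have := ih hxs (s + x) b (c + 1)
        omega
      · rw [if_neg (by omega), if_neg hle]
        have hall : ∀ r ∈ xs, b - s < r := fun r hr => by
          have := hx r hr; omega
        rw [aloop_skip_all xs (b - s) c hall]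
        omega

-- ===== VERDICT (by name: the statement is the Claim_ definition above) =====
theorem solution_spec : Claim_equal_solution := by
  intro d budget _
  unfold Spec_solution solution solution_alt
  have hpair : (PySem.List.sorted d (fun x => x) false).Pairwise (· ≤ ·) :=
    PySem.List.sorted_pairwise d (fun x => x)
  have := aloop_eq_count (PySem.List.sorted d (fun x => x) false) hpair 0 budget 0
  simpa using this
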